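-- pv_equiv track=rewrite | github.com/Pinkyrana398/SEIR-Assignments | Assignment2.py | compute_simhash
-- ===== SOURCE A (Python) =====
-- def polynomial_hash(word):
--     p = 53
--     m = 1 << 64   # 2^64
--
--     result = 0
--     power = 1
--
--     for ch in word:
--         ascii_value = ord(ch)
--         result = (result + ascii_value * power) % m
--         power = (power * p) % m
--
--     return result
--
-- def compute_simhash(freq_dict):
--     vector = [0] * 64
--
--     for word, freq in freq_dict.items():
--         h = polynomial_hash(word)
--
--         for i in range(64):
--             bitmask = 1 << i
--
--             if h & bitmask:
--                 vector[i] += freq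
--             else:
--                 vector[i] -= freq
--
--     # Now build final hash
--     simhash = 0
--
--     for i in range(64):
--         if vector[i] > 0:
--             simhash |= (1 << i)
--
--     return simhash
-- ===== SOURCE B (Python) =====
-- def polynomial_hash(word):
--     p = 53
--     m = 1 << 64   # 2^64
--
--     result = 0
--     power = 1
--
--     for ch in word:
--         ascii_value = ord(ch)
--         result = (result + ascii_value * power) % m
--         power = (power * p) % m
--
--     return result
--
--
-- def compute_simhash(freq_dict):
--     # Hash each word once, up front; no signed 64-slot accumulator.
--     items = [(polynomial_hash(word), freq) for word, freq in freq_dict.items()]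
--     total = sum(freq for _, freq in items)
--
--     simhash = 0
--     for i in range(64):
--         bitmask = 1 << i
--         ones = sum(freq for h, freq in items if h & bitmask)
--         # vector[i] > 0  in A is exactly  2*ones - total > 0
--         if 2 * ones > total:
--             simhash |= bitmask
--     return simhash
-- ===== Notes on version B (the rewrite author's own statement) =====
-- stated objective: simpler
-- what changed: B drops A's mutable 64-slot signed +/- vector: it hashes each word once up front, transposes the loops (bits outer, words inner as a sum comprehension), counts only the set-bit weight 'ones' per bit, and sets the output bit when 2*ones > total.
import Mathlib
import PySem

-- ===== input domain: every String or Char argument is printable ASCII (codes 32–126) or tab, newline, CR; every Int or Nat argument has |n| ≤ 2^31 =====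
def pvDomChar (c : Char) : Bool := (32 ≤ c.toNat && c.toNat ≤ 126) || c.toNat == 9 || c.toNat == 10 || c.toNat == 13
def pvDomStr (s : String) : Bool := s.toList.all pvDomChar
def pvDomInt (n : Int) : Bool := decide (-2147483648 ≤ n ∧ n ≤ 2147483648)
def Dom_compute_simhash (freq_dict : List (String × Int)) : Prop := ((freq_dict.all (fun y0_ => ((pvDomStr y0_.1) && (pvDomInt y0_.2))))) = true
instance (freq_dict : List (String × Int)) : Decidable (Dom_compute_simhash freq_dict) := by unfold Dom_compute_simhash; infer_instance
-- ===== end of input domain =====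

-- B is a simpler decomposition (no mutable signed vector; bits outer, 2*ones>total test); return values proved equal on all inputs.

-- ===== PORT A =====
-- shared helper: literal transliteration of polynomial_hash (used verbatim by both Pythons)
def polynomial_hash (word : String) : Int :=
  let p : Int := 53
  let m : Int := ((1 <<< 64 : Nat) : Int)
  let st := word.toList.foldl (fun (st : Int × Int) ch =>
    let ascii_value : Int := (ch.toNat : Int)
    ((st.1 + ascii_value * st.2) % m, (st.2 * p) % m)) (0, 1)
  st.1

def compute_simhash (freq_dict : List (String × Int)) : Int :=
  let vector : List Int := List.replicate 64 0
  let vector := freq_dict.foldl (fun vector wf =>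
    let h := polynomial_hash wf.1
    (List.range 64).foldl (fun vector i =>
      let bitmask : Int := ((1 <<< i : Nat) : Int)
      if PySem.Int.band h bitmask ≠ 0 then
        vector.set i (vector[i]! + wf.2)
      else
        vector.set i (vector[i]! - wf.2)) vector) vector
  (List.range 64).foldl (fun simhash i =>
    if vector[i]! > (0:Int) then PySem.Int.bor simhash ((1 <<< i : Nat) : Int) else simhash) 0

-- ===== PORT B =====
def compute_simhash_alt (freq_dict : List (String × Int)) : Int :=
  let items := freq_dict.map (fun wf => (polynomial_hash wf.1, wf.2))
  let total := (items.map (fun p => p.2)).sum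
  (List.range 64).foldl (fun simhash i =>
    let bitmask : Int := ((1 <<< i : Nat) : Int)
    let ones := ((items.filter (fun p => PySem.Int.band p.1 bitmask != 0)).map (fun p => p.2)).sum
    if 2 * ones > total then PySem.Int.bor simhash bitmask else simhash) 0

-- ===== PRECONDITION & SPEC =====
def Spec_compute_simhash (freq_dict : List (String × Int)) (out : Int) : Prop := out = compute_simhash_alt freq_dict
instance (freq_dict : List (String × Int)) (out : Int) : Decidable (Spec_compute_simhash freq_dict out) := by unfold Spec_compute_simhash; infer_instance

-- ===== CLAIM (what is proved, stated in full; the proofs are below) =====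
def Claim_equal_compute_simhash : Prop := ∀ (freq_dict : List (String × Int)), Dom_compute_simhash freq_dict → Spec_compute_simhash freq_dict (compute_simhash freq_dict)

-- ===== LEMMAS AND PROOFS =====

-- signed contribution of one (word,freq) pair to slot i of A's vector
def pvContrib (i : Nat) (wf : String × Int) : Int :=
  if PySem.Int.band (polynomial_hash wf.1) ((1 <<< i : Nat) : Int) ≠ 0 then wf.2 else -wf.2

-- generic: the inner range-fold of pointwise sets
theorem pv_fold_set (g : Nat → Int → Int) :
    ∀ (n : Nat) (v : List Int), n ≤ v.length →
      ((List.range n).foldl (fun v i => v.set i (g i v[i]!)) v).length = v.length ∧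
      ∀ j, j < v.length →
        ((List.range n).foldl (fun v i => v.set i (g i v[i]!)) v)[j]! =
          if j < n then g j v[j]! else v[j]! := by
  intro n
  induction n with
  | zero => intro v _; simp
  | succ n ih =>
    intro v hn
    have hn' : n ≤ v.length := Nat.le_of_succ_le hn
    obtain ⟨hlen, hget⟩ := ih v hn'
    rw [List.range_succ, List.foldl_append]
    set r := (List.range n).foldl (fun v i => v.set i (g i v[i]!)) v with hr
    have hrn : r[n]! = v[n]! := by
      rw [hget n (Nat.lt_of_succ_le hn)]; simp
    constructor
    · simp [List.length_set, hlen]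
    · intro j hj
      simp only [List.foldl_cons, List.foldl_nil]
      by_cases hjn : j = n
      · subst hjn
        rw [List.getElem!_eq_getElem?_getD, List.getElem?_set_self]
        · simp [hrn]
        · omega
      · rw [List.getElem!_eq_getElem?_getD, List.getElem?_set_ne (by omega)]
        rw [← List.getElem!_eq_getElem?_getD, hget j hj]
        split_ifs with h1 h2 h2 <;> (first | rfl | omega)

theorem pv_outer (L : List (String × Int)) :
    ∀ (v : List Int), v.length = 64 →
      (L.foldl (fun vector wf =>
        (List.range 64).foldl (fun vector i =>
          let bitmask : Int := ((1 <<< i : Nat) : Int)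
          if PySem.Int.band (polynomial_hash wf.1) bitmask ≠ 0 then
            vector.set i (vector[i]! + wf.2)
          else
            vector.set i (vector[i]! - wf.2)) vector) v).length = 64 ∧
      ∀ j, j < 64 →
        (L.foldl (fun vector wf =>
          (List.range 64).foldl (fun vector i =>
            let bitmask : Int := ((1 <<< i : Nat) : Int)
            if PySem.Int.band (polynomial_hash wf.1) bitmask ≠ 0 then
              vector.set i (vector[i]! + wf.2)
            else
              vector.set i (vector[i]! - wf.2)) vector) v)[j]! =
          v[j]! + (L.map (pvContrib j)).sum := by
  induction L with
  | nil => intro v hv; simp [hv]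
  | cons wf L ih =>
    intro v hv
    have hstep : ∀ (w : List Int), (List.range 64).foldl (fun vector i =>
        let bitmask : Int := ((1 <<< i : Nat) : Int)
        if PySem.Int.band (polynomial_hash wf.1) bitmask ≠ 0 then
          vector.set i (vector[i]! + wf.2)
        else
          vector.set i (vector[i]! - wf.2)) w =
        (List.range 64).foldl (fun vector i => vector.set i (vector[i]! + pvContrib i wf)) w := by
      intro w
      apply PySem.List.foldl_congr_mem
      intro vec i _
      simp only [pvContrib]
      split_ifs <;> ring_nf
    have h1 := pv_fold_set (fun i x => x + pvContrib i wf) 64 v (by omega)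
    simp only [List.foldl_cons, hstep]
    obtain ⟨hlen1, hget1⟩ := h1
    obtain ⟨hlen2, hget2⟩ := ih _ (by rw [hlen1, hv])
    refine ⟨hlen2, ?_⟩
    intro j hj
    rw [hget2 j hj, hget1 j (by omega)]
    simp [hj]; ring

theorem pv_sum_split (i : Nat) (L : List (String × Int)) :
    (L.map (pvContrib i)).sum =
      2 * ((L.filter (fun p => PySem.Int.band (polynomial_hash p.1) ((1 <<< i : Nat) : Int) != 0)).map (fun p => p.2)).sum
        - (L.map (fun p => p.2)).sum := by
  induction L with
  | nil => simp
  | cons wf L ih =>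
    simp only [List.map_cons, List.sum_cons, List.filter_cons]
    by_cases h : PySem.Int.band (polynomial_hash wf.1) ((1 <<< i : Nat) : Int) = 0
    · have hc : pvContrib i wf = -wf.2 := by unfold pvContrib; exact if_neg (not_not_intro h)
      have hb : (PySem.Int.band (polynomial_hash wf.1) ((1 <<< i : Nat) : Int) != 0) = false :=
        bne_eq_false_iff_eq.mpr h
      rw [hc, hb]
      simp only [Bool.false_eq_true, if_false]
      omega
    · have hc : pvContrib i wf = wf.2 := by unfold pvContrib; exact if_pos h
      have hb : (PySem.Int.band (polynomial_hash wf.1) ((1 <<< i : Nat) : Int) != 0) = true :=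
        bne_iff_ne.mpr h
      rw [hc, hb]
      simp only [if_true, List.map_cons, List.sum_cons]
      omega

-- ===== VERDICT (by name: the statement is the Claim_ definition above) =====
theorem compute_simhash_spec : Claim_equal_compute_simhash := by
  intro L _
  unfold Spec_compute_simhash compute_simhash compute_simhash_alt
  simp only []
  obtain ⟨_, hget⟩ := pv_outer L (List.replicate 64 0) (by simp)
  apply PySem.List.foldl_congr_mem
  intro s i hi
  have hi64 : i < 64 := by simpa using List.mem_range.mp hi
  rw [hget i hi64]
  have : (List.replicate 64 (0:Int))[i]! = 0 := by
    rw [List.getElem!_eq_getElem?_getD]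
    simp only [List.getElem?_replicate, hi64, if_pos, Option.getD_some]
  rw [this, pv_sum_split i L]
  have hmap : (L.map (fun wf => (polynomial_hash wf.1, wf.2))).map (fun p => p.2) = L.map (fun p => p.2) := by
    simp [List.map_map]
  have hfil : ((L.map (fun wf => (polynomial_hash wf.1, wf.2))).filter (fun p => PySem.Int.band p.1 ((1 <<< i : Nat) : Int) != 0)).map (fun p => p.2)
      = (L.filter (fun p => PySem.Int.band (polynomial_hash p.1) ((1 <<< i : Nat) : Int) != 0)).map (fun p => p.2) := by
    rw [List.filter_map, List.map_map]; rfl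
  rw [hmap, hfil]
  simp only [zero_add, gt_iff_lt, sub_pos]
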